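-- pv_equiv track=rewrite | github.com/dglava/falcon-briefing | falcon-briefing.py | verify_options
-- ===== SOURCE A (Python) =====
-- def verify_options(config_content):
--     print_file = False
--     append_briefing = False
--     briefing_html = False
--     for line in config_content:
--         if line[1] == "g_nPrintToFile" and line[2] == "1":
--             print_file = True
--         elif line[1] == "g_bAppendToBriefingFile" and line[2] == "0":
--             append_briefing = True
--         elif line[1] == "g_bBriefHTML" and line[2] == "1":
--             briefing_html = True
--     return print_file & append_briefing & briefing_html
-- ===== SOURCE B (Python) =====
-- def verify_options(config_content):
--     def option_set(key, value):
--         return any(line[1] == key and line[2] == value for line in config_content)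
--     return (option_set("g_nPrintToFile", "1")
--             and option_set("g_bAppendToBriefingFile", "0")
--             and option_set("g_bBriefHTML", "1"))
-- ===== Notes on version B (the rewrite author's own statement) =====
-- stated objective: simpler
-- what changed: Replaces the single stateful pass with three mutable boolean flags and an if/elif chain by three independent, short-circuiting any() scans, one per required option, combined with 'and'; no loop state at all.
import Mathlib
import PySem

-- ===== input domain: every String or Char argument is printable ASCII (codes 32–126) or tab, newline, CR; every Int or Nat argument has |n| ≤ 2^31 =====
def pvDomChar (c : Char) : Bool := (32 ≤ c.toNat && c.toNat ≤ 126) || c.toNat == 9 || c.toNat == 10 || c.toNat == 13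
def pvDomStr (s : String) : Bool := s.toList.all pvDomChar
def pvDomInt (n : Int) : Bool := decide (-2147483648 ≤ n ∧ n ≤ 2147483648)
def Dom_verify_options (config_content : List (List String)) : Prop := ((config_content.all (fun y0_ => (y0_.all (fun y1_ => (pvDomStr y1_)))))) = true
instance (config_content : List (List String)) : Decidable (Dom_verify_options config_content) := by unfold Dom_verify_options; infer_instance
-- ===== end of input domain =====

-- B replaces A's single stateful pass (three boolean accumulators, if/elif chain) by
-- three independent short-circuiting any-scans, one per required option (objective: simpler).

-- ===== PORT A =====
def stepA (st : Bool × Bool × Bool) (line : List String) : Bool × Bool × Bool :=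
  if PySem.List.pyGet? line 1 == some "g_nPrintToFile" && PySem.List.pyGet? line 2 == some "1" then
    (true, st.2.1, st.2.2)
  else if PySem.List.pyGet? line 1 == some "g_bAppendToBriefingFile" && PySem.List.pyGet? line 2 == some "0" then
    (st.1, true, st.2.2)
  else if PySem.List.pyGet? line 1 == some "g_bBriefHTML" && PySem.List.pyGet? line 2 == some "1" then
    (st.1, st.2.1, true)
  else st

def verify_options (config_content : List (List String)) : Bool :=
  let st := config_content.foldl stepA (false, false, false)
  st.1 && st.2.1 && st.2.2

-- ===== PORT B =====
-- B's generator element: line[1] == key and line[2] == value (short-circuit 'and';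
-- pyGet? none models the out-of-range access, which Pre_ keeps out of A's raising set)
def optionSet (config_content : List (List String)) (key value : String) : Bool :=
  config_content.any (fun line =>
    (PySem.List.pyGet? line 1 == some key) && (PySem.List.pyGet? line 2 == some value))

def verify_options_alt (config_content : List (List String)) : Bool :=
  optionSet config_content "g_nPrintToFile" "1"
    && optionSet config_content "g_bAppendToBriefingFile" "0"
    && optionSet config_content "g_bBriefHTML" "1"

-- ===== PRECONDITION & SPEC =====
-- Pre_ excludes exactly the inputs on which Python A raises IndexError: a line shorter
-- than 2, or a line whose second field is one of the three option names but with no third field.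
def Pre_verify_options (config_content : List (List String)) : Prop :=
  ∀ line ∈ config_content, 2 ≤ line.length ∧
    ((line.getD 1 "" = "g_nPrintToFile" ∨ line.getD 1 "" = "g_bAppendToBriefingFile" ∨
      line.getD 1 "" = "g_bBriefHTML") → 3 ≤ line.length)
instance (config_content : List (List String)) : Decidable (Pre_verify_options config_content) := by
  unfold Pre_verify_options; infer_instance
def pvWitness_verify_options : List (List String) :=
  [["set", "g_nPrintToFile", "1"], ["set", "g_bBriefHTML", "0"], ["set", "other", ""]]
def Spec_verify_options (config_content : List (List String)) (out : Bool) : Prop := out = verify_options_alt config_content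
instance (config_content : List (List String)) (out : Bool) : Decidable (Spec_verify_options config_content out) := by unfold Spec_verify_options; infer_instance

-- ===== CLAIM =====
def Claim_equal_verify_options : Prop := ∀ (config_content : List (List String)), Dom_verify_options config_content → Pre_verify_options config_content → Spec_verify_options config_content (verify_options config_content)

-- ===== LEMMAS AND PROOFS =====

-- B's per-line predicate for a given required option
def mOpt (key value : String) (line : List String) : Bool :=
  (PySem.List.pyGet? line 1 == some key) && (PySem.List.pyGet? line 2 == some value)

-- pyGet? on a sufficiently long cons-list
theorem pyGet1_cons (a b : String) (r : List String) :
    PySem.List.pyGet? (a :: b :: r) 1 = some b := by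
  simp [PySem.List.pyGet?, PySem.List.pyIdx?]

theorem pyGet2_cons (a b c : String) (r : List String) :
    PySem.List.pyGet? (a :: b :: c :: r) 2 = some c := by
  have h : (2:Int) ≤ (r.length:Int) + 1 + 1 := by
    have := Int.natCast_nonneg r.length; omega
  simp [PySem.List.pyGet?, PySem.List.pyIdx?, h]

-- each line acts on A's state exactly as the three independent per-option tests
theorem stepA_eq (st : Bool × Bool × Bool) (line : List String) :
    stepA st line = (st.1 || mOpt "g_nPrintToFile" "1" line,
                     st.2.1 || mOpt "g_bAppendToBriefingFile" "0" line,
                     st.2.2 || mOpt "g_bBriefHTML" "1" line) := by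
  match line with
  | [] => simp [stepA, mOpt, PySem.List.pyGet?, PySem.List.pyIdx?]
  | [a] => simp [stepA, mOpt, PySem.List.pyGet?, PySem.List.pyIdx?]
  | [a, b] => simp [stepA, mOpt, PySem.List.pyGet?, PySem.List.pyIdx?]
  | a :: b :: c :: rest' =>
    by_cases hb : b = "g_nPrintToFile" ∨ b = "g_bAppendToBriefingFile" ∨ b = "g_bBriefHTML"
    · have g1 := pyGet1_cons a b (c :: rest')
      have g2 := pyGet2_cons a b c rest'
      rcases hb with hb | hb | hb <;> subst hb <;>
        simp only [stepA, mOpt, g1, g2] <;>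
        by_cases hv1 : c = "1" <;> by_cases hv0 : c = "0" <;>
        simp_all <;> simp [beq_eq_false_iff_ne.mpr hv1, beq_eq_false_iff_ne.mpr hv0]
    · push Not at hb
      obtain ⟨n1, n2, n3⟩ := hb
      have g1 := pyGet1_cons a b (c :: rest')
      have g2 := pyGet2_cons a b c rest'
      have e1 : (b == "g_nPrintToFile") = false := by simp [n1]
      have e2 : (b == "g_bAppendToBriefingFile") = false := by simp [n2]
      have e3 : (b == "g_bBriefHTML") = false := by simp [n3]
      simp [stepA, mOpt, g1, g2, e1, e2, e3]

-- A's fold computes the three any-scans, or-ed onto the incoming state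
theorem foldl_stepA (cfg : List (List String)) (st : Bool × Bool × Bool) :
    cfg.foldl stepA st = (st.1 || cfg.any (mOpt "g_nPrintToFile" "1"),
                          st.2.1 || cfg.any (mOpt "g_bAppendToBriefingFile" "0"),
                          st.2.2 || cfg.any (mOpt "g_bBriefHTML" "1")) := by
  induction cfg generalizing st with
  | nil => simp
  | cons line rest ih =>
    rw [List.foldl_cons, stepA_eq st line, ih]
    simp [Bool.or_assoc]

-- ===== VERDICT =====
theorem verify_options_spec : Claim_equal_verify_options := by
  intro cfg _ _
  unfold Spec_verify_options verify_options verify_options_alt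
  rw [foldl_stepA cfg (false, false, false)]
  simp only [optionSet]
  rfl
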